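-- pv_equiv track=rewrite | github.com/Amit-jha98/social-media-monitoring-system- | backend/services/triangulation.py | correlate_by_keyword
-- ===== SOURCE A (Python) =====
-- def correlate_by_keyword(records):
--     """Group records by keyword to find related activity across platforms."""
--     keyword_groups = {}
--     for record in records:
--         keyword = record.get('keyword', '')
--         keyword_groups.setdefault(keyword, []).append({
--             'platform': record.get('platform'),
--             'user': record.get('user_name') or record.get('channel_name'),
--             'timestamp': record.get('timestamp'),
--         })
--     return keyword_groups
-- ===== SOURCE B (Python) =====
-- def correlate_by_keyword(records):
--     """Group records by keyword: collect distinct keywords in first-occurrence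
--     order, then build each group by filtering the records for that keyword."""
--     def proj(r):
--         return {
--             'platform': r.get('platform'),
--             'user': r.get('user_name') or r.get('channel_name'),
--             'timestamp': r.get('timestamp'),
--         }
--     keys = []
--     for r in records:
--         k = r.get('keyword', '')
--         if k not in keys:
--             keys.append(k)
--     return {k: [proj(r) for r in records if r.get('keyword', '') == k]
--             for k in keys}
-- ===== Notes on version B (the rewrite author's own statement) =====
-- stated objective: alternative
-- what changed: A scatters records into dict buckets with setdefault/append in one pass; B first collects the distinct keywords in first-occurrence order and then builds each group by a filtering comprehension over the records (no mutable dict accumulation).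
import Mathlib
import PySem

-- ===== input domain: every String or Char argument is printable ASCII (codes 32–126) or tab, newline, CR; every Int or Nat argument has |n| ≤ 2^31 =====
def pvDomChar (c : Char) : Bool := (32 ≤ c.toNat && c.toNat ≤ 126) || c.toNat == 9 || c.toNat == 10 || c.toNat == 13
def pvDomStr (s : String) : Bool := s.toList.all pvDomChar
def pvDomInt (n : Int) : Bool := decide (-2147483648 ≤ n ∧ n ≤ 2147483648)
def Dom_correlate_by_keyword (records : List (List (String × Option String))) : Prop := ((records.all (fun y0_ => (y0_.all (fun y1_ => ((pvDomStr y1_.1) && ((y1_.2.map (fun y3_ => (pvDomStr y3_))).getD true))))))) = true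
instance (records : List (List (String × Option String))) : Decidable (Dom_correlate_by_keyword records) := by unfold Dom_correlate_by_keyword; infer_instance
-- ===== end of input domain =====

-- B groups by first collecting the distinct keywords, then filtering the records per keyword,
-- instead of A's scatter-into-dict-buckets pass; same return value (alternative decomposition, no speed claim).

-- Shared helpers: both Pythons compute the identical per-record projection and keyword lookup.
-- record.get(k) on a dict[str, Optional[str]]: absent and present-None both yield None.
def pvGet (r : List (String × Option String)) (k : String) : Option String :=
  (PySem.Dict.mk r).getD k none

-- Python 'a or b' on Optional[str]: falsy = None or ''.
def pvOr (a b : Option String) : Option String :=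
  match a with
  | none => b
  | some s => if s = "" then b else some s

-- record.get('keyword', ''); under Pre_ the stored value is never None, so .getD "" only fills the absent-key default.
def pvKeyword (r : List (String × Option String)) : String :=
  ((PySem.Dict.mk r).getD "keyword" (some "")).getD ""

def pvProj (r : List (String × Option String)) : List (String × Option String) :=
  [("platform", pvGet r "platform"),
   ("user", pvOr (pvGet r "user_name") (pvGet r "channel_name")),
   ("timestamp", pvGet r "timestamp")]

-- ===== PORT A =====
-- keyword_groups.setdefault(kw, []).append(proj) == keyword_groups[kw] = keyword_groups.get(kw, []) + [proj] == Dict.modify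
def correlate_by_keyword (records : List (List (String × Option String))) : List (String × List (List (String × Option String))) :=
  (records.foldl
    (fun (d : PySem.Dict String (List (List (String × Option String)))) r =>
      d.modify (pvKeyword r) [] (fun l => l ++ [pvProj r]))
    PySem.Dict.empty).items

-- ===== PORT B =====
def correlate_by_keyword_alt (records : List (List (String × Option String))) : List (String × List (List (String × Option String))) :=
  let keys : PySem.Set String :=
    records.foldl (fun ks r => PySem.Set.add ks (pvKeyword r)) PySem.Set.empty
  keys.map (fun k => (k, (records.filter (fun r => pvKeyword r == k)).map pvProj))

-- ===== PRECONDITION & SPEC =====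
-- Pre_ excludes records that store None under 'keyword': there Python A returns a dict whose key is
-- None, not a str, so the result leaves the declared return type dict[str, list[...]].
def Pre_correlate_by_keyword (records : List (List (String × Option String))) : Prop :=
  ∀ r ∈ records, (PySem.Dict.mk r).get? "keyword" ≠ some none
instance (records : List (List (String × Option String))) : Decidable (Pre_correlate_by_keyword records) := by unfold Pre_correlate_by_keyword; infer_instance

def pvWitness_correlate_by_keyword : (List (List (String × Option String))) :=
  [[("keyword", some "k1"), ("platform", some "x")], [("user_name", none)]]

def Spec_correlate_by_keyword (records : List (List (String × Option String))) (out : List (String × List (List (String × Option String)))) : Prop := out = correlate_by_keyword_alt records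
instance (records : List (List (String × Option String))) (out : List (String × List (List (String × Option String)))) : Decidable (Spec_correlate_by_keyword records out) := by unfold Spec_correlate_by_keyword; infer_instance

-- ===== CLAIM (what is proved, stated in full; the proofs are below) =====
def Claim_equal_correlate_by_keyword : Prop := ∀ (records : List (List (String × Option String))), Dom_correlate_by_keyword records → Pre_correlate_by_keyword records → Spec_correlate_by_keyword records (correlate_by_keyword records)

-- ===== LEMMAS AND PROOFS =====

theorem correlate_eq (records : List (List (String × Option String))) :
    correlate_by_keyword records = correlate_by_keyword_alt records := by
  simp only [correlate_by_keyword, correlate_by_keyword_alt]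
  set D := records.foldl
      (fun (d : PySem.Dict String (List (List (String × Option String)))) r =>
        d.modify (pvKeyword r) [] (fun l => l ++ [pvProj r]))
      PySem.Dict.empty with hD
  have hkeys : D.keys = PySem.Set.ofList (records.map pvKeyword) := by
    rw [hD, PySem.Dict.keys_foldl_modify_key records pvKeyword [] (fun _ r => fun l => l ++ [pvProj r])]
    simp [PySem.Set.update, PySem.Set.ofList_eq_foldl]
  have hnd : D.keys.Nodup := by
    rw [hD]
    exact PySem.Dict.nodup_keys_foldl_modify_key records pvKeyword [] _ _ (by simp)
  have hget : ∀ k, D.getD k [] = (records.filter (fun r => pvKeyword r == k)).map pvProj := by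
    intro k
    have hfuse : D = (records.map (fun r => (pvKeyword r, pvProj r))).foldl
        (fun d p => d.modify p.1 [] (fun l => l ++ [p.2])) PySem.Dict.empty := by
      rw [hD, List.foldl_map]
    rw [hfuse, PySem.Dict.getD_foldl_modify_append, List.filter_map, List.map_map]
    rfl
  have hset : (records.foldl (fun ks r => PySem.Set.add ks (pvKeyword r)) PySem.Set.empty)
      = PySem.Set.ofList (records.map pvKeyword) := by
    rw [PySem.Set.ofList_eq_foldl, List.foldl_map]
    rfl
  rw [PySem.Dict.items_eq_map_keys D hnd [], hkeys, hset]
  exact List.map_congr_left (fun k _ => by rw [hget k])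

-- ===== VERDICT (by name: the statement is the Claim_ definition above) =====
theorem correlate_by_keyword_spec : Claim_equal_correlate_by_keyword := by
  intro records _ _
  unfold Spec_correlate_by_keyword
  exact correlate_eq records
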